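-- pv_equiv track=rewrite | github.com/MDGroup-WatanabeLab/mdpython | Structure/stack.py | sort_ion
-- ===== SOURCE A (Python) =====
-- def sort_ion(ion, atom_type):
--     atom = sorted(set(atom_type), key = atom_type.index)
--     atom_ion = []
--     for i in atom:
--         for j in range(len(atom_type)):
--             if i == atom_type[j]:
--                 atom_ion.append(ion[j])
--     return atom_ion
-- ===== SOURCE B (Python) =====
-- def sort_ion(ion, atom_type):
--     groups = {}
--     for j, t in enumerate(atom_type):
--         groups.setdefault(t, []).append(ion[j])
--     out = []
--     for vals in groups.values():
--         out += vals
--     return out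
-- ===== Notes on version B (the rewrite author's own statement) =====
-- stated objective: faster
-- what changed: Replaces the distinct-type list plus one full rescan of atom_type per type with a single enumerate pass that groups ion values into an insertion-ordered dict, then concatenates the groups.
import Mathlib
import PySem

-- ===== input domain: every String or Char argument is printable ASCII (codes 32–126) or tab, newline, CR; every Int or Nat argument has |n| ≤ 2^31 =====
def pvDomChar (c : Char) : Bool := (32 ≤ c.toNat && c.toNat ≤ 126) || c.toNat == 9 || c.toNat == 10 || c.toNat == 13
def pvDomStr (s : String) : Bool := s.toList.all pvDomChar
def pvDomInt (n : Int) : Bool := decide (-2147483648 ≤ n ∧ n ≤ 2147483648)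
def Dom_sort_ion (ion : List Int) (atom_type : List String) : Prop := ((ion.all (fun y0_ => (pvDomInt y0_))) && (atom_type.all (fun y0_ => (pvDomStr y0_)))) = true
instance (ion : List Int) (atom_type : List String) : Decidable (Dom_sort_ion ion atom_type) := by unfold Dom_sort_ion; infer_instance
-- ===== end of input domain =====

-- B replaces A's per-distinct-type rescans of atom_type by one enumerate pass grouping
-- ion values in an insertion-ordered dict; return values agree on all of Pre_.

-- ===== PORT A =====
def sort_ion (ion : List Int) (atom_type : List String) : List Int :=
  let atom := PySem.List.sorted (PySem.Set.ofList atom_type)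
      (fun t => (PySem.List.index? atom_type t).getD 0)
  atom.foldl (fun acc t =>
    (PySem.List.pyRange 0 (PySem.List.len atom_type)).foldl
      (fun acc2 j =>
        if t == PySem.List.pyGetD atom_type j "" then
          acc2 ++ [PySem.List.pyGetD ion j 0]
        else acc2)
      acc) []

-- ===== PORT B =====
def sort_ion_alt (ion : List Int) (atom_type : List String) : List Int :=
  let groups := (PySem.List.enumerate atom_type).foldl
      (fun d p => d.modify p.2 [] (fun v => v ++ [PySem.List.pyGetD ion p.1 0]))
      PySem.Dict.empty
  groups.values.foldl (fun out v => out ++ v) []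

-- ===== PRECONDITION & SPEC =====
-- Pre_ excludes exactly the inputs where atom_type is longer than ion, on which both
-- Python A and Python B raise IndexError at ion[j].
def Pre_sort_ion (ion : List Int) (atom_type : List String) : Prop :=
  atom_type.length ≤ ion.length
instance (ion : List Int) (atom_type : List String) : Decidable (Pre_sort_ion ion atom_type) := by unfold Pre_sort_ion; infer_instance
def pvWitness_sort_ion : List Int × List String := ([3, 1, 2], ["O", "H", "O"])

def Spec_sort_ion (ion : List Int) (atom_type : List String) (out : List Int) : Prop := out = sort_ion_alt ion atom_type
instance (ion : List Int) (atom_type : List String) (out : List Int) : Decidable (Spec_sort_ion ion atom_type out) := by unfold Spec_sort_ion; infer_instance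

-- ===== CLAIM (what is proved, stated in full; the proofs are below) =====
def Claim_equal_sort_ion : Prop := ∀ (ion : List Int) (atom_type : List String), Dom_sort_ion ion atom_type → Pre_sort_ion ion atom_type → Spec_sort_ion ion atom_type (sort_ion ion atom_type)

-- ===== LEMMAS AND PROOFS =====

-- The distinct elements in first-appearance order have strictly increasing first indices.
theorem pv_ofList_pairwise_index (xs : List String) :
    (PySem.Set.ofList xs).Pairwise
      (fun a b => (PySem.List.index? xs a).getD 0 < (PySem.List.index? xs b).getD 0) := by
  induction xs using List.reverseRecOn with
  | nil => simp [PySem.Set.ofList]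
  | append_singleton xs x ih =>
    have hstep : ∀ a ∈ PySem.Set.ofList xs,
        PySem.List.index? (xs ++ [x]) a = PySem.List.index? xs a := by
      intro a ha
      exact PySem.List.index?_append_of_mem _ ((PySem.Set.mem_ofList xs a).1 ha)
    have hleft : (PySem.Set.ofList xs).Pairwise
        (fun a b => (PySem.List.index? (xs ++ [x]) a).getD 0
                  < (PySem.List.index? (xs ++ [x]) b).getD 0) := by
      refine ih.imp_of_mem ?_
      intro a b ha hb h
      rw [hstep a ha, hstep b hb]; exact h
    rw [PySem.Set.ofList_append_singleton]
    by_cases hx : x ∈ PySem.Set.ofList xs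
    · rw [PySem.Set.add_of_mem hx]; exact hleft
    · rw [PySem.Set.add_of_not_mem hx, List.pairwise_append]
      refine ⟨hleft, List.pairwise_singleton _ _, ?_⟩
      intro a ha b hb
      simp only [List.mem_singleton] at hb
      rw [hb]
      have hax : a ∈ xs := (PySem.Set.mem_ofList xs a).1 ha
      have hxn : x ∉ xs := fun h => hx ((PySem.Set.mem_ofList xs x).2 h)
      obtain ⟨k, hk⟩ := Option.isSome_iff_exists.1 ((PySem.List.index?_isSome_iff xs a).2 hax)
      obtain ⟨hklt, -, -⟩ := PySem.List.getElem_of_index?_eq_some hk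
      rw [hstep a ha, PySem.List.index?_append_singleton_self xs x hxn, hk]
      simpa using hklt

-- Sorting set(xs) by first index is the first-appearance order.
theorem pv_atom_eq (xs : List String) :
    PySem.List.sorted (PySem.Set.ofList xs)
      (fun t => (PySem.List.index? xs t).getD 0) = PySem.Set.ofList xs :=
  PySem.List.sorted_eq_of_perm_of_pairwise_lt _ _ _ (List.Perm.refl _)
    (pv_ofList_pairwise_index xs)

-- The group-by fold's entry for t collects g p.1 over the pairs with second component t.
theorem pv_getD_groupfold (g : Int → Int) (l : List (Int × String))
    (d : PySem.Dict String (List Int)) (t : String) :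
    (l.foldl (fun d p => d.modify p.2 [] (fun v => v ++ [g p.1])) d).getD t []
      = d.getD t [] ++ (l.filter (fun p => p.2 == t)).map (fun p => g p.1) := by
  induction l generalizing d with
  | nil => simp
  | cons p l ih =>
      simp only [List.foldl_cons, ih, List.filter_cons]
      by_cases h : p.2 = t
      · simp [h]
      · simp [h, PySem.Dict.getD_modify, Ne.symm h]

-- B's value as a flatMap over the distinct atom types, in first-appearance order.
theorem pv_alt_eq_flatMap (ion : List Int) (atom_type : List String) :
    sort_ion_alt ion atom_type
      = (PySem.Set.ofList atom_type).flatMap (fun t =>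
          ((PySem.List.pyRange 0 (PySem.List.len atom_type)).filter
            (fun j => t == PySem.List.pyGetD atom_type j "")).map
            (fun j => PySem.List.pyGetD ion j 0)) := by
  unfold sort_ion_alt
  set g : Int → Int := fun j => PySem.List.pyGetD ion j 0 with hg
  set l := PySem.List.enumerate atom_type with hl
  set D := l.foldl (fun d p => d.modify p.2 [] (fun v => v ++ [g p.1])) PySem.Dict.empty with hD
  have hkeys : D.keys = PySem.Set.ofList atom_type := by
    have h := PySem.Dict.keys_foldl_modify_key (l := l) (key := fun p => p.2)
      (d0 := ([] : List Int)) (f := fun _ p v => v ++ [g p.1]) (d := PySem.Dict.empty)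
    simp only [hD]
    rw [h]
    simp [PySem.Set.update, PySem.Set.ofList, PySem.List.map_snd_enumerate, hl]
  have hnodup : D.keys.Nodup := by rw [hkeys]; exact PySem.Set.nodup_ofList _
  have hvals := PySem.Dict.values_eq_map_keys D hnodup []
  show D.values.foldl (fun out v => out ++ v) [] = _
  rw [PySem.List.foldl_append_eq_flatten, List.nil_append, hvals, hkeys]
  rw [← List.flatMap_def]
  congr 1
  funext t
  rw [pv_getD_groupfold g l PySem.Dict.empty t]
  rw [PySem.Dict.getD_empty, List.nil_append, hl,
      PySem.List.enumerate_eq_map_pyRange atom_type "", List.filter_map, List.map_map]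
  congr 1
  apply List.filter_congr
  intro j _
  simp [Function.comp, BEq.comm]

-- ===== VERDICT (by name: the statement is the Claim_ definition above) =====
theorem sort_ion_spec : Claim_equal_sort_ion := by
  intro ion atom_type _ _
  unfold Spec_sort_ion
  rw [pv_alt_eq_flatMap]
  unfold sort_ion
  simp only [pv_atom_eq, PySem.List.foldl_append_if, PySem.List.foldl_append_eq_flatMap,
    List.nil_append]
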